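-- pv_equiv track=rewrite | github.com/amine-a11/advent-of-code | 2024/day07/part1.py | check
-- ===== SOURCE A (Python) =====
-- def check(l,target):
--     n=len(l)-1
--
--     for i in range(1<<n):
--         s = bin(i)[2:].zfill(n)
--         somme=l[0]
--         for j in range(1,len(l)):
--             if s[j-1]=='0':
--                 somme+=l[j]
--             else:
--                 somme*=l[j]
--         if somme==target:
--             return True
--
--     return False
-- ===== SOURCE B (Python) =====
-- def check(l, target):
--     # DP over the set of reachable values: process each element once,
--     # extending every reachable prefix value by + and by *, deduplicating.
--     sums = {l[0]}
--     for x in l[1:]: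
--         sums = {s + x for s in sums} | {s * x for s in sums}
--     return target in sums
-- ===== Notes on version B (the rewrite author's own statement) =====
-- stated objective: alternative
-- what changed: replaces the enumeration of all 2^(n-1) operator bitmasks (each decoded from a zero-padded binary string and re-evaluated over the whole list) by a single left-to-right pass maintaining the deduplicated set of reachable values
import Mathlib
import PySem

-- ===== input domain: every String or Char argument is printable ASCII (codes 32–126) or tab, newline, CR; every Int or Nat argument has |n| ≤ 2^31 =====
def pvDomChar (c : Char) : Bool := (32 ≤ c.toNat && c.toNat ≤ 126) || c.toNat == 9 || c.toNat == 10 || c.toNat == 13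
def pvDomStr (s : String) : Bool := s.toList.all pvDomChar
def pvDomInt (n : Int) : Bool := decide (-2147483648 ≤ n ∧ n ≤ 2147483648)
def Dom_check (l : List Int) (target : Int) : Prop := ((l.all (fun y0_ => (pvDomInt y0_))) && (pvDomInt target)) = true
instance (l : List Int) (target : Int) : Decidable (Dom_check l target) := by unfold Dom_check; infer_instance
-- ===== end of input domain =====

-- B replaces A's enumeration of all operator bitmasks (decoded from zero-padded binary
-- strings, each re-evaluated over the whole list) by one left-to-right pass over the list
-- maintaining the deduplicated set of reachable values.


-- ===== PORT A =====
-- Transliteration of A. Under Pre_check (l ≠ []) every index taken below is in range in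
-- Python, so `getD` is exact; `bin(i)[2:]` is PySem.Int.toBinChars, `.zfill(n)` is
-- PySem.Chars.zfill; the early `return True` of the outer loop is `List.any`.
def check (l : List Int) (target : Int) : Bool :=
  let n : Nat := l.length - 1
  (List.range (1 <<< n)).any (fun i =>
    let s : List Char := PySem.Chars.zfill (PySem.Int.toBinChars (i : Int)) (n : Int)
    let somme : Int :=
      (List.range' 1 n).foldl
        (fun somme j =>
          if s.getD (j - 1) ' ' = '0' then somme + l.getD j 0 else somme * l.getD j 0)
        (l.getD 0 0)
    somme == target)

-- ===== PORT B =====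
-- Transliteration of B (Source B). On [] the Python B raises IndexError (outside Pre_check).
def check_alt (l : List Int) (target : Int) : Bool :=
  match l with
  | [] => false
  | a :: rest =>
    let sums : PySem.Set Int :=
      rest.foldl
        (fun sums x =>
          PySem.Set.union (PySem.Set.ofList (sums.map (· + x))) (sums.map (· * x)))
        (PySem.Set.ofList [a])
    PySem.Set.contains sums target

-- ===== PRECONDITION & SPEC =====
-- Pre_check excludes only the empty list, on which both Pythons raise
-- (A: ValueError from `1 << -1`; B: IndexError from `l[0]`).
def Pre_check (l : List Int) (target : Int) : Prop := l ≠ []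
instance (l : List Int) (target : Int) : Decidable (Pre_check l target) := by
  unfold Pre_check; infer_instance
def pvWitness_check : List Int × Int := ([3, 2, 5], 11)
def Spec_check (l : List Int) (target : Int) (out : Bool) : Prop := out = check_alt l target
instance (l : List Int) (target : Int) (out : Bool) : Decidable (Spec_check l target out) := by
  unfold Spec_check; infer_instance

-- ===== CLAIM (what is proved, stated in full; the proofs are below) =====
def Claim_equal_check : Prop :=
  ∀ (l : List Int) (target : Int), Dom_check l target → Pre_check l target →
    Spec_check l target (check l target)

-- ===== LEMMAS AND PROOFS =====

def myBits (i : Nat) : List Char :=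
  if h : i < 2 then [Nat.digitChar i]
  else myBits (i / 2) ++ [Nat.digitChar (i % 2)]
decreasing_by exact Nat.div_lt_self (by omega) (by omega)

theorem toDigitsCore_eq (f : Nat) : ∀ (i : Nat) (ds : List Char), i < 2 ^ f →
    Nat.toDigitsCore 2 (f + 1) i ds = myBits i ++ ds := by
  induction f with
  | zero =>
    intro i ds h
    have : i = 0 := by simpa using h
    subst this
    rw [Nat.toDigitsCore, myBits]
    simp
  | succ f ih =>
    intro i ds h
    rw [Nat.toDigitsCore]
    by_cases h2 : i / 2 = 0
    · simp only [h2, if_pos]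
      rw [myBits]
      have hi : i < 2 := by omega
      simp [hi, Nat.mod_eq_of_lt hi]
    · simp only [h2, if_neg h2]
      rw [ih (i / 2) _ (by
        have := Nat.pow_pos (n := f) (by omega : 0 < 2)
        omega)]
      conv_rhs => rw [myBits]
      have hi : ¬ i < 2 := by omega
      simp [hi]

theorem toBinChars_natCast (i : Nat) : PySem.Int.toBinChars (i : Int) = myBits i := by
  simp [PySem.Int.toBinChars, Nat.toDigits]
  rw [show i + 1 = i + 1 from rfl, toDigitsCore_eq i i [] (by
    calc i < 2 ^ i := Nat.lt_two_pow_self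
    _ ≤ 2 ^ i := le_refl _)]
  simp

theorem myBits_chars (i : Nat) : ∀ c ∈ myBits i, c = '0' ∨ c = '1' := by
  induction i using myBits.induct with
  | case1 i h =>
    rw [myBits]; simp [h]
    interval_cases i <;> simp [Nat.digitChar]
  | case2 i h ih =>
    rw [myBits]; simp [h]
    intro c hc
    rcases hc with hc | hc
    · exact ih c hc
    · have : i % 2 = 0 ∨ i % 2 = 1 := by omega
      rcases this with h2 | h2 <;> simp [hc, h2, Nat.digitChar]

theorem myBits_ne_nil (i : Nat) : myBits i ≠ [] := by
  rw [myBits]; split <;> simp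

theorem myBits_len : ∀ (n i : Nat), i < 2 ^ n → 1 ≤ n → (myBits i).length ≤ n := by
  intro n
  induction n with
  | zero => omega
  | succ n ih =>
    intro i h _
    by_cases h2 : i < 2
    · rw [myBits]; simp [h2]
    · have hn : 1 ≤ n := by
        by_contra hn
        have : n = 0 := by omega
        subst this; simp at h; omega
      rw [myBits, dif_neg h2]
      simp only [List.length_append, List.length_cons, List.length_nil]
      have h3 : 0 < 2 ^ n := Nat.pow_pos (by omega)
      have := ih (i / 2) (by omega) hn
      omega

def pad (n i : Nat) : List Char :=
  List.replicate (n - (myBits i).length) '0' ++ myBits i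

theorem zfill_digits (cs : List Char) (hne : cs ≠ []) (hd : ∀ c ∈ cs, c = '0' ∨ c = '1')
    (k : Nat) : PySem.Chars.zfill cs (k : Int) = List.replicate (k - cs.length) '0' ++ cs := by
  rw [PySem.Chars.zfill.eq_def]
  match cs, hne with
  | c :: rest, _ =>
    have hc := hd c (by simp)
    have hc' : ¬ (c = '+' ∨ c = '-') := by rcases hc with h | h <;> simp [h]
    by_cases hk : (k : Int) ≤ (((c :: rest).length : Nat) : Int)
    · rw [if_pos hk]
      have hk' : k ≤ (c :: rest).length := by exact_mod_cast hk
      rw [show k - (c :: rest).length = 0 from by omega]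
      simp
    · rw [if_neg hk]
      simp [hc']

theorem pad_eq_zfill (n i : Nat) :
    PySem.Chars.zfill (PySem.Int.toBinChars (i : Int)) (n : Int) = pad n i := by
  rw [toBinChars_natCast, zfill_digits _ (myBits_ne_nil i) (myBits_chars i), pad]

theorem pad_chars (n i : Nat) : ∀ c ∈ pad n i, c = '0' ∨ c = '1' := by
  intro c hc
  rw [pad] at hc
  rcases List.mem_append.mp hc with h | h
  · left; exact List.eq_of_mem_replicate h
  · exact myBits_chars i c h

theorem pad_len (n i : Nat) : n ≤ (pad n i).length := by
  rw [pad]; simp; omega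

theorem pad_step : ∀ (n : Nat), 1 ≤ n → ∀ j < 2 ^ (n + 1),
    pad (n + 1) j = pad n (j / 2) ++ [Nat.digitChar (j % 2)] := by
  intro n hn j hj
  by_cases h2 : j < 2
  · have hj2 : j / 2 = 0 := by omega
    have hm : j % 2 = j := by omega
    rw [pad, pad, hj2, hm]
    rw [myBits, dif_pos h2]
    rw [show myBits 0 = ['0'] from by rw [myBits]; decide]
    simp only [List.length_cons, List.length_nil]
    rw [show n + 1 - 1 = (n - 1) + 1 from by omega, List.replicate_succ', List.append_assoc]
  · rw [pad, pad]
    conv_lhs => rw [myBits, dif_neg h2]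
    have hlen : (myBits (j / 2)).length ≤ n := by
      apply myBits_len n _ (by
        have h3 : 0 < 2 ^ n := Nat.pow_pos (by omega)
        omega) hn
    simp only [List.length_append, List.length_cons, List.length_nil]
    rw [show n + 1 - ((myBits (j / 2)).length + 1) = n - (myBits (j / 2)).length from by omega]
    simp [List.append_assoc]

theorem myBits_pow_add : ∀ (n : Nat), 1 ≤ n → ∀ j < 2 ^ n,
    myBits (2 ^ n + j) = '1' :: pad n j := by
  intro n
  induction n with
  | zero => omega
  | succ n ih =>
    intro _ j hj
    have hge : ¬ (2 ^ (n + 1) + j < 2) := by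
      have : (2:Nat) ^ 1 ≤ 2 ^ (n + 1) := Nat.pow_le_pow_right (by omega) (by omega)
      simp at this
      omega
    rw [myBits, dif_neg hge]
    have hdiv : (2 ^ (n + 1) + j) / 2 = 2 ^ n + j / 2 := by
      rw [pow_succ]
      omega
    have hmod : (2 ^ (n + 1) + j) % 2 = j % 2 := by
      rw [pow_succ]
      omega
    rw [hdiv, hmod]
    by_cases hn : 1 ≤ n
    · rw [ih hn (j / 2) (by rw [pow_succ] at hj; omega)]
      rw [pad_step n hn j hj]
      simp
    · have : n = 0 := by omega
      subst this
      have : j / 2 = 0 := by omega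
      rw [this, show (2:Nat) ^ 0 + 0 = 1 from rfl]
      rw [show myBits 1 = ['1'] from by rw [myBits]; decide]
      rw [pad]
      have : j < 2 := by simpa using hj
      rw [myBits, dif_pos this]
      simp [Nat.mod_eq_of_lt this]

theorem pad_zero_cons (n i : Nat) (h1 : 1 ≤ n) (h2 : i < 2 ^ n) :
    pad (n + 1) i = '0' :: pad n i := by
  rw [pad, pad]
  have := myBits_len n i h2 h1
  rw [show n + 1 - (myBits i).length = (n - (myBits i).length) + 1 from by omega,
      List.replicate_succ]
  simp

theorem pad_one_cons (n i : Nat) (h1 : 1 ≤ n) (h2 : i < 2 ^ n) :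
    pad (n + 1) (2 ^ n + i) = '1' :: pad n i := by
  rw [pad, myBits_pow_add n h1 i h2]
  have hlen : n ≤ ('1' :: pad n i).length := by
    simp only [List.length_cons]
    have := pad_len n i
    omega
  rw [show n + 1 - ('1' :: pad n i).length = 0 from by simp at hlen ⊢; have := pad_len n i; omega]
  simp

theorem surj : ∀ (w : List Char), (∀ c ∈ w, c = '0' ∨ c = '1') → w ≠ [] →
    ∃ i, i < 2 ^ w.length ∧ pad w.length i = w := by
  intro w
  induction w with
  | nil => intro _ h; exact absurd rfl h
  | cons c w ih =>
    intro hd _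
    by_cases hw : w = []
    · subst hw
      rcases hd c (by simp) with h | h
      · exact ⟨0, by simp, by rw [h, pad, show myBits 0 = ['0'] from by rw [myBits]; decide]; simp⟩
      · exact ⟨1, by simp, by
          rw [h, pad, show myBits 1 = ['1'] from by rw [myBits]; decide]; simp⟩
    · obtain ⟨i, hi, hpad⟩ := ih (fun x hx => hd x (by simp [hx])) hw
      have hw1 : 1 ≤ w.length := by
        cases w with
        | nil => exact absurd rfl hw
        | cons _ _ => simp
      rcases hd c (by simp) with h | h
      · refine ⟨i, ?_, ?_⟩
        · calc i < 2 ^ w.length := hi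
            _ ≤ 2 ^ (c :: w).length := Nat.pow_le_pow_right (by omega) (by simp)
        · rw [List.length_cons, pad_zero_cons w.length i hw1 hi, hpad, h]
      · refine ⟨2 ^ w.length + i, ?_, ?_⟩
        · rw [List.length_cons, pow_succ]; omega
        · rw [List.length_cons, pad_one_cons w.length i hw1 hi, hpad, h]

def evB (acc : Int) (p : Char × Int) : Int := if p.1 = '0' then acc + p.2 else acc * p.2

theorem zip_take_length (s : List Char) (r : List Int) : (s.take r.length).zip r = s.zip r := by
  induction s generalizing r with
  | nil => simp
  | cons c s ih =>
    cases r with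
    | nil => simp
    | cons x r => simp [ih]

theorem foldIdx : ∀ (r : List Int) (s : List Char) (a : Int), r.length ≤ s.length →
    (List.range r.length).foldl
      (fun acc m => if s.getD m ' ' = '0' then acc + r.getD m 0 else acc * r.getD m 0) a
    = (s.zip r).foldl evB a := by
  intro r
  induction r with
  | nil => intro s a _; simp
  | cons x r ih =>
    intro s a hlen
    cases s with
    | nil => simp at hlen
    | cons c s =>
      simp only [List.length_cons]
      rw [List.range_succ_eq_map, List.foldl_cons, List.foldl_map]
      simp only [List.getD_cons_zero, List.getD_cons_succ, Nat.succ_eq_add_one]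
      rw [ih s _ (by simpa using hlen)]
      simp [evB]

theorem foldB : ∀ (r : List Int) (S : PySem.Set Int) (t : Int),
    (t ∈ r.foldl
        (fun sums x =>
          PySem.Set.union (PySem.Set.ofList (sums.map (· + x))) (sums.map (· * x))) S)
    ↔ ∃ s ∈ S, ∃ w : List Char, w.length = r.length ∧ (∀ c ∈ w, c = '0' ∨ c = '1') ∧
        (w.zip r).foldl evB s = t := by
  intro r
  induction r with
  | nil =>
    intro S t
    simp only [List.foldl_nil, List.length_nil]
    constructor
    · intro h; exact ⟨t, h, [], by simp⟩
    · rintro ⟨s, hs, w, hw, _, hev⟩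
      rw [List.length_eq_zero_iff] at hw
      subst hw
      simpa using hev ▸ hs
  | cons x r ih =>
    intro S t
    rw [List.foldl_cons, ih]
    constructor
    · rintro ⟨s', hs', w', hw', hch', hev'⟩
      rw [PySem.Set.mem_union, PySem.Set.mem_ofList] at hs'
      rcases hs' with hs' | hs' <;> rcases List.mem_map.mp hs' with ⟨s, hs, rfl⟩
      · exact ⟨s, hs, '0' :: w', by simpa using hw', by
          intro c hc
          rcases List.mem_cons.mp hc with h | h
          · exact Or.inl h
          · exact hch' c h, by simpa [evB] using hev'⟩
      · exact ⟨s, hs, '1' :: w', by simpa using hw', by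
          intro c hc
          rcases List.mem_cons.mp hc with h | h
          · exact Or.inr h
          · exact hch' c h, by simpa [evB] using hev'⟩
    · rintro ⟨s, hs, w, hw, hch, hev⟩
      cases w with
      | nil => simp at hw
      | cons c w' =>
        have hc := hch c (by simp)
        refine ⟨if c = '0' then s + x else s * x, ?_, w', by simpa using hw,
          fun d hd => hch d (by simp [hd]), ?_⟩
        · rw [PySem.Set.mem_union, PySem.Set.mem_ofList]
          rcases hc with h | h
          · exact Or.inl (List.mem_map.mpr ⟨s, hs, by simp [h]⟩)
          · exact Or.inr (List.mem_map.mpr ⟨s, hs, by simp [h]⟩)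
        · simpa [evB] using hev

theorem check_iff (a : Int) (rest : List Int) (target : Int) :
    check (a :: rest) target = true ↔
      ∃ w : List Char, w.length = rest.length ∧ (∀ c ∈ w, c = '0' ∨ c = '1') ∧
        (w.zip rest).foldl evB a = target := by
  have hbody : ∀ i : Nat,
      (List.range' 1 rest.length).foldl
        (fun somme j =>
          if (PySem.Chars.zfill (PySem.Int.toBinChars (i : Int)) ((rest.length : Nat) : Int)).getD
              (j - 1) ' ' = '0'
          then somme + (a :: rest).getD j 0 else somme * (a :: rest).getD j 0)
        ((a :: rest).getD 0 0)
      = ((pad rest.length i).zip rest).foldl evB a := by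
    intro i
    rw [pad_eq_zfill, List.range'_eq_map_range, List.foldl_map,
      ← foldIdx rest (pad rest.length i) a (pad_len _ _), List.getD_cons_zero]
    apply PySem.List.foldl_congr_mem
    intro acc m hm
    simp [Nat.add_comm 1 m]
  unfold check
  simp only [List.length_cons, Nat.add_sub_cancel, Nat.one_shiftLeft]
  rw [List.any_eq_true]
  constructor
  · rintro ⟨i, hi, hev⟩
    rw [List.mem_range] at hi
    rw [beq_iff_eq] at hev
    rw [hbody i] at hev
    refine ⟨(pad rest.length i).take rest.length, ?_, ?_, ?_⟩
    · rw [List.length_take]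
      have := pad_len rest.length i
      omega
    · intro c hc
      exact pad_chars _ _ c (List.mem_of_mem_take hc)
    · rw [zip_take_length]
      exact hev
  · rintro ⟨w, hlen, hchars, hev⟩
    cases rest with
    | nil =>
      refine ⟨0, by simp, ?_⟩
      rw [beq_iff_eq, hbody 0]
      simp only [List.zip_nil_right, List.foldl_nil]
      rw [List.length_eq_zero_iff.mp hlen] at hev
      simpa using hev
    | cons y ys =>
      have hw : w ≠ [] := by
        intro h
        subst h
        simp at hlen
      obtain ⟨i, hi, hpad⟩ := surj w hchars hw
      refine ⟨i, by rw [List.mem_range, ← hlen]; exact hi, ?_⟩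
      rw [beq_iff_eq, hbody i, ← hlen, hpad, hev]

theorem check_alt_iff (a : Int) (rest : List Int) (target : Int) :
    check_alt (a :: rest) target = true ↔
      ∃ w : List Char, w.length = rest.length ∧ (∀ c ∈ w, c = '0' ∨ c = '1') ∧
        (w.zip rest).foldl evB a = target := by
  unfold check_alt
  rw [PySem.Set.contains_iff, foldB]
  constructor
  · rintro ⟨s, hs, w, hw, hch, hev⟩
    rw [PySem.Set.mem_ofList] at hs
    rcases List.mem_singleton.mp hs with rfl
    exact ⟨w, hw, hch, hev⟩
  · rintro ⟨w, hw, hch, hev⟩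
    exact ⟨a, by rw [PySem.Set.mem_ofList]; simp, w, hw, hch, hev⟩

-- ===== VERDICT (by name: the statement is the Claim_ definition above) =====
theorem check_spec : Claim_equal_check := by
  intro l target _ hpre
  unfold Spec_check
  match l with
  | [] => exact absurd rfl hpre
  | a :: rest =>
    rw [Bool.eq_iff_iff, check_iff, check_alt_iff]
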